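-- pv_equiv track=rewrite | github.com/Alex16111977/Lir | src/generators/exercises_generator.py | _normalize_german_word
-- ===== SOURCE A (Python) =====
-- def _normalize_german_word(german: str) -> str:
--     german = (german or "").strip()
--     if not german:
--         return ""
--     for article in ("der ", "die ", "das ", "den ", "dem ", "des "):
--         if german.lower().startswith(article):
--             german = german[len(article) :]
--             break
--     return german.strip()
-- ===== SOURCE B (Python) =====
-- _ARTICLES = {"der", "die", "das", "den", "dem", "des"}
--
-- def _normalize_german_word(german: str) -> str:
--     german = (german or "").strip()
--     if not german:
--         return ""
--     parts = german.split(" ", 1)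
--     if len(parts) == 2 and parts[0].lower() in _ARTICLES:
--         german = parts[1]
--     return german.strip()
-- ===== Notes on version B (the rewrite author's own statement) =====
-- stated objective: simpler
-- what changed: B tokenizes the stripped string once at the first space character using a single maxsplit-1 split and tests the first token for membership in a set of bare articles, instead of A's loop over six article-plus-space prefixes with lower().startswith and slicing.
import Mathlib
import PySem

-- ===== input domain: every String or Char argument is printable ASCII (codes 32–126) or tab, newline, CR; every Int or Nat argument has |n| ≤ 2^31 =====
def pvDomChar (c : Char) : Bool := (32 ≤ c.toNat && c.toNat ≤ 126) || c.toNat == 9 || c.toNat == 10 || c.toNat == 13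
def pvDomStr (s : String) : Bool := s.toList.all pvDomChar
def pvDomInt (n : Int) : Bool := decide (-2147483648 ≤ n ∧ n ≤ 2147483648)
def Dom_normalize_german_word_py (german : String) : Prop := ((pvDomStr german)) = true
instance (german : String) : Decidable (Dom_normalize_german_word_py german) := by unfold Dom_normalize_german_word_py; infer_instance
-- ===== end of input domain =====

-- B strips, splits once at the first literal space and tests the first token against a set of bare
-- articles, instead of A's loop over six "article + space" prefixes; objective: simpler.

-- ===== PORT A =====
-- the tuple of article prefixes A iterates over ("der ", "die ", …), as char lists
def pvArticlesA : List (List Char) :=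
  [['d','e','r',' '], ['d','i','e',' '], ['d','a','s',' '], ['d','e','n',' '], ['d','e','m',' '], ['d','e','s',' ']]

-- A's for-loop with break: the first matching article is sliced off, then the loop stops
def pvALoop (g : List Char) : List (List Char) → List Char
  | [] => g
  | a :: rest =>
    if PySem.Chars.startswith (PySem.Chars.lower g) a then
      PySem.List.slice g (some (a.length : Int)) none
    else pvALoop g rest

def normalize_german_word_py (german : String) : String :=
  let g := PySem.Chars.strip german.toList
  if g = [] then ""
  else String.ofList (PySem.Chars.strip (pvALoop g pvArticlesA))

-- ===== PORT B =====
def pvArticleSetB : List (List Char) :=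
  [['d','e','r'], ['d','i','e'], ['d','a','s'], ['d','e','n'], ['d','e','m'], ['d','e','s']]

def normalize_german_word_py_alt (german : String) : String :=
  let g := PySem.Chars.strip german.toList
  if g = [] then ""
  else
    let parts := PySem.Chars.splitOnMax g [' '] 1
    let g2 := if parts.length = 2 ∧ PySem.Chars.lower (parts.getD 0 []) ∈ pvArticleSetB
              then parts.getD 1 [] else g
    String.ofList (PySem.Chars.strip g2)

-- ===== PRECONDITION & SPEC =====
def Spec_normalize_german_word_py (german : String) (out : String) : Prop := out = normalize_german_word_py_alt german
instance (german : String) (out : String) : Decidable (Spec_normalize_german_word_py german out) := by unfold Spec_normalize_german_word_py; infer_instance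

-- ===== CLAIM (what is proved, stated in full; the proofs are below) =====
def Claim_equal_normalize_german_word_py : Prop := ∀ (german : String), Dom_normalize_german_word_py german → Spec_normalize_german_word_py german (normalize_german_word_py german)

-- ===== LEMMAS AND PROOFS =====

-- lowering a character yields a space only for the space itself
lemma pv_lowerChar_eq_space_iff (c : Char) : PySem.Chars.lowerChar c = ' ' ↔ c = ' ' := by
  unfold PySem.Chars.lowerChar PySem.Chars.isupper
  split_ifs with h
  · simp only [Bool.and_eq_true, decide_eq_true_eq] at h
    constructor
    · intro he
      exfalso
      have h65 : 65 ≤ c.toNat := h.1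
      have h90 : c.toNat ≤ 90 := h.2
      have hv : (c.toNat + 32).isValidChar := by left; omega
      have := congrArg Char.toNat he
      rw [Char.toNat_ofNat (c.toNat+32)] at this
      simp [hv] at this
      omega
    · intro he; subst he; simp at h
  · exact Iff.rfl

-- go of splitOnMax with no splits left returns the remainder as one last piece
lemma pv_go_zero (l cur : List Char) (acc : List (List Char)) (fuel : Nat) (h : 0 < fuel) :
    PySem.Chars.splitOnMax.go [' '] fuel 0 l cur acc = ((cur.reverse ++ l) :: acc).reverse := by
  cases l with
  | nil => cases fuel with
    | zero => omega
    | succ f => simp [PySem.Chars.splitOnMax.go]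
  | cons c rest => cases fuel with
    | zero => omega
    | succ f => simp [PySem.Chars.splitOnMax.go]

-- go with sep " " and one split left, characterized by the first space of the remainder
lemma pv_go_one (l : List Char) : ∀ (fuel : Nat) (cur : List Char) (acc : List (List Char)),
    l.length < fuel →
    PySem.Chars.splitOnMax.go [' '] fuel 1 l cur acc =
      (match l.dropWhile (· ≠ ' ') with
       | [] => ((cur.reverse ++ l) :: acc).reverse
       | _ :: q => (q :: (cur.reverse ++ l.takeWhile (· ≠ ' ')) :: acc).reverse) := by
  induction l with
  | nil =>
    intro fuel cur acc h
    cases fuel with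
    | zero => omega
    | succ f => simp [PySem.Chars.splitOnMax.go]
  | cons c rest ih =>
    intro fuel cur acc h
    cases fuel with
    | zero => simp at h
    | succ f =>
      by_cases hc : c = ' '
      · subst hc
        have hpre : [' '].isPrefixOf (' ' :: rest) = true := by simp [List.isPrefixOf]
        simp only [PySem.Chars.splitOnMax.go, hpre, if_pos]
        rw [pv_go_zero _ _ _ f (by simp at h; omega)]
        simp [List.dropWhile]
      · have hpre : [' '].isPrefixOf (c :: rest) = false := by
          simp [List.isPrefixOf]; exact fun hh => absurd hh.symm hc
        simp only [PySem.Chars.splitOnMax.go, hpre]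
        rw [ih f (c :: cur) acc (by simp at h; omega)]
        simp [List.dropWhile, List.takeWhile, hc]

-- g.split(" ", 1) returns [g] if g has no space, else the part before and after the first space
lemma pv_split_one (g : List Char) :
    PySem.Chars.splitOnMax g [' '] 1 =
      (match g.dropWhile (· ≠ ' ') with
       | [] => [g]
       | _ :: q => [g.takeWhile (· ≠ ' '), q]) := by
  unfold PySem.Chars.splitOnMax
  rw [if_neg (by omega)]
  rw [show (Int.toNat 1) = 1 from rfl, pv_go_one g (g.length + 1) [] [] (by omega)]
  cases hdw : g.dropWhile (· ≠ ' ') <;> simp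

-- a first token of three non-space letters plus a following space forces g.length ≥ 4
lemma pv_art_len (g : List Char) (a0 a1 a2 : Char)
    (hne : g.dropWhile (· ≠ ' ') ≠ []) (hl : PySem.Chars.lower (g.takeWhile (· ≠ ' ')) = [a0, a1, a2]) :
    4 ≤ g.length := by
  have h3 := congrArg List.length hl
  have h4 : (g.takeWhile (· ≠ ' ')).length + (g.dropWhile (· ≠ ' ')).length = g.length := by
    rw [← List.length_append, List.takeWhile_append_dropWhile]
  have h6 : 0 < (g.dropWhile (· ≠ ' ')).length := List.length_pos_iff.mpr hne
  simp only [PySem.Chars.lower, List.length_map, List.length_cons, List.length_nil] at h3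
  simp only [ne_eq] at h3 h4 h6
  omega

-- 'g.lower().startswith(a0a1a2 + " ")' in terms of the first-space decomposition of g
lemma pv_art_iff (g : List Char) (a0 a1 a2 : Char)
    (h0 : a0 ≠ ' ') (h1 : a1 ≠ ' ') (h2 : a2 ≠ ' ') :
    PySem.Chars.startswith (PySem.Chars.lower g) [a0, a1, a2, ' '] = true ↔
      (g.dropWhile (· ≠ ' ') ≠ [] ∧ PySem.Chars.lower (g.takeWhile (· ≠ ' ')) = [a0, a1, a2]) := by
  have hsp := pv_lowerChar_eq_space_iff
  have hsmall : g.length < 4 → (PySem.Chars.startswith (PySem.Chars.lower g) [a0, a1, a2, ' '] = true ↔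
      (g.dropWhile (· ≠ ' ') ≠ [] ∧ PySem.Chars.lower (g.takeWhile (· ≠ ' ')) = [a0, a1, a2])) := by
    intro hlen
    rw [PySem.Chars.startswith_iff]
    constructor
    · intro hpre
      have := hpre.length_le
      simp [PySem.Chars.lower] at this
      omega
    · rintro ⟨hne, hl⟩
      exact absurd (pv_art_len g a0 a1 a2 hne hl) (by omega)
  match g with
  | [] => exact hsmall (by simp)
  | [c0] => exact hsmall (by simp)
  | [c0, c1] => exact hsmall (by simp)
  | [c0, c1, c2] => exact hsmall (by simp)
  | c0 :: c1 :: c2 :: c3 :: rest =>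
    rw [PySem.Chars.startswith_iff]
    by_cases hc0 : c0 = ' '
    · subst hc0
      simp [PySem.Chars.lower, List.cons_prefix_cons, List.dropWhile, List.takeWhile,
        show PySem.Chars.lowerChar ' ' = ' ' from rfl, h0]
    · by_cases hc1 : c1 = ' '
      · subst hc1
        simp [PySem.Chars.lower, List.cons_prefix_cons, List.dropWhile, List.takeWhile, hc0,
          show PySem.Chars.lowerChar ' ' = ' ' from rfl, h1]
      · by_cases hc2 : c2 = ' '
        · subst hc2
          simp [PySem.Chars.lower, List.cons_prefix_cons, List.dropWhile, List.takeWhile, hc0, hc1,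
            show PySem.Chars.lowerChar ' ' = ' ' from rfl, h2]
        · by_cases hc3 : c3 = ' '
          · subst hc3
            simp [PySem.Chars.lower, List.cons_prefix_cons, List.dropWhile, List.takeWhile,
              hc0, hc1, hc2, show PySem.Chars.lowerChar ' ' = ' ' from rfl, eq_comm]
          · constructor
            · intro h
              simp only [PySem.Chars.lower, List.map, List.cons_prefix_cons] at h
              obtain ⟨-, -, -, e3, -⟩ := h
              exact absurd ((hsp c3).mp e3.symm) hc3
            · rintro ⟨-, hl⟩
              exfalso
              have h3 := congrArg List.length hl
              simp only [PySem.Chars.lower, List.length_map, List.length_cons, List.length_nil] at h3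
              simp [List.takeWhile, hc0, hc1, hc2, hc3] at h3

-- dropping the four prefix characters (three-letter token plus the space) leaves the tail
lemma pv_slice_four (g p : List Char) (c : Char) (q : List Char)
    (hsplit : g = p ++ c :: q) (hp : p.length = 3) :
    PySem.List.slice g (some (4 : Int)) none = q := by
  rw [PySem.List.slice_some_none]
  have h4 : g.length = 4 + q.length := by subst hsplit; simp [hp]; omega
  have hcl : PySem.List.clampIdx g.length (4 : Int) = 4 := by
    rw [show ((4 : Int)) = ((4 : Nat) : Int) from rfl, PySem.List.clampIdx_natCast]
    omega
  rw [hcl]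
  have : g = (p ++ [c]) ++ q := by simp [hsplit]
  rw [this, show 4 = (p ++ [c]).length by simp [hp], List.drop_left]

-- ===== VERDICT (by name: the statement is the Claim_ definition above) =====
theorem normalize_german_word_py_spec : Claim_equal_normalize_german_word_py := by
  unfold Claim_equal_normalize_german_word_py Spec_normalize_german_word_py
  intro german _
  unfold normalize_german_word_py normalize_german_word_py_alt
  set g := PySem.Chars.strip german.toList with hg
  by_cases hnil : g = []
  · simp [hnil]
  · simp only [hnil, if_false]
    have d1 := pv_art_iff g 'd' 'e' 'r' (by decide) (by decide) (by decide)
    have d2 := pv_art_iff g 'd' 'i' 'e' (by decide) (by decide) (by decide)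
    have d3 := pv_art_iff g 'd' 'a' 's' (by decide) (by decide) (by decide)
    have d4 := pv_art_iff g 'd' 'e' 'n' (by decide) (by decide) (by decide)
    have d5 := pv_art_iff g 'd' 'e' 'm' (by decide) (by decide) (by decide)
    have d6 := pv_art_iff g 'd' 'e' 's' (by decide) (by decide) (by decide)
    cases hdw : g.dropWhile (· ≠ ' ') with
    | nil =>
      simp only [ne_eq, decide_not] at hdw
      simp [pvALoop, pvArticlesA, d1, d2, d3, d4, d5, d6, hdw, pv_split_one]
    | cons c q =>
      have hg_eq : g = g.takeWhile (· ≠ ' ') ++ c :: q := by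
        conv_lhs => rw [← List.takeWhile_append_dropWhile (p := (· ≠ ' ')) (l := g)]
        rw [hdw]
      by_cases hmem : PySem.Chars.lower (g.takeWhile (· ≠ ' ')) ∈ pvArticleSetB
      · rcases (by simpa [pvArticleSetB] using hmem :
            PySem.Chars.lower (g.takeWhile (· ≠ ' ')) = ['d','e','r'] ∨
            PySem.Chars.lower (g.takeWhile (· ≠ ' ')) = ['d','i','e'] ∨
            PySem.Chars.lower (g.takeWhile (· ≠ ' ')) = ['d','a','s'] ∨
            PySem.Chars.lower (g.takeWhile (· ≠ ' ')) = ['d','e','n'] ∨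
            PySem.Chars.lower (g.takeWhile (· ≠ ' ')) = ['d','e','m'] ∨
            PySem.Chars.lower (g.takeWhile (· ≠ ' ')) = ['d','e','s']) with h | h | h | h | h | h <;>
        · have hlen3 : (g.takeWhile (· ≠ ' ')).length = 3 := by
            have := congrArg List.length h
            simpa [PySem.Chars.lower] using this
          have hsl := pv_slice_four g _ c q hg_eq hlen3
          simp only [ne_eq, decide_not] at hdw h
          simp [pvALoop, pvArticlesA, d1, d2, d3, d4, d5, d6, hdw, h, pv_split_one,
            pvArticleSetB, hsl]
      · obtain ⟨n1, n2, n3, n4, n5, n6⟩ :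
            ¬ PySem.Chars.lower (g.takeWhile (· ≠ ' ')) = ['d','e','r'] ∧
            ¬ PySem.Chars.lower (g.takeWhile (· ≠ ' ')) = ['d','i','e'] ∧
            ¬ PySem.Chars.lower (g.takeWhile (· ≠ ' ')) = ['d','a','s'] ∧
            ¬ PySem.Chars.lower (g.takeWhile (· ≠ ' ')) = ['d','e','n'] ∧
            ¬ PySem.Chars.lower (g.takeWhile (· ≠ ' ')) = ['d','e','m'] ∧
            ¬ PySem.Chars.lower (g.takeWhile (· ≠ ' ')) = ['d','e','s'] := by
          simpa [pvArticleSetB, not_or] using hmem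
        simp only [ne_eq, decide_not] at hdw n1 n2 n3 n4 n5 n6
        simp [pvALoop, pvArticlesA, d1, d2, d3, d4, d5, d6, hdw, pv_split_one,
          pvArticleSetB, n1, n2, n3, n4, n5, n6]
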